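-- pv_equiv track=rewrite | github.com/fgu30/Leetcode | OA/goldman/balancedarray.py | solve
-- ===== SOURCE A (Python) =====
-- def solve(nums):
--     _sum = sum(nums) ## O(n)
--     n = len(nums)
--     l = 0
--     r = n - 1
--     while l < r:
--         mid = l + r >> 1
--         if sum(nums[:mid]) > (_sum - nums[mid]) //2:
--             r = mid - 1
--         elif sum(nums[:mid]) < (_sum - nums[mid]) //2:
--             l = mid + 1
--         else:
--             return mid
-- ===== SOURCE B (Python) =====
-- def solve(nums):
--     # Precompute prefix sums once, so the binary search does O(1) work per step
--     # (A recomputes sum(nums[:mid]) inside every iteration).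
--     pre = [0]
--     acc = 0
--     for x in nums:
--         acc += x
--         pre.append(acc)
--     total = pre[-1]
--     l = 0
--     r = len(nums) - 1
--     while l < r:
--         mid = l + r >> 1
--         left = pre[mid]
--         target = (total - (pre[mid + 1] - pre[mid])) // 2
--         if left > target:
--             r = mid - 1
--         elif left < target:
--             l = mid + 1
--         else:
--             return mid
-- ===== Notes on version B (the rewrite author's own statement) =====
-- stated objective: faster
-- what changed: B precomputes the prefix-sum array once so each binary-search step does O(1) lookups (pre[mid], pre[mid+1]-pre[mid]) instead of re-summing nums[:mid] and indexing nums[mid] every iteration.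
import Mathlib
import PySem

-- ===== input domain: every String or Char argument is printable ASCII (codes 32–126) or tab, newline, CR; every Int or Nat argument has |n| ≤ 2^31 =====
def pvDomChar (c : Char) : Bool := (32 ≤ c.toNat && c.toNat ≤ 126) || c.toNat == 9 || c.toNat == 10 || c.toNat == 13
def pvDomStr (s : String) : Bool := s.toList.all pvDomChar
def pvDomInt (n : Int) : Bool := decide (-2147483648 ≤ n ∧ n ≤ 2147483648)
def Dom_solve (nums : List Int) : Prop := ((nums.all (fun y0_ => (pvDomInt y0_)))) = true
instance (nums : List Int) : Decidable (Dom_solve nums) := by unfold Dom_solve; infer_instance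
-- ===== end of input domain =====

-- B precomputes the prefix-sum array once so the binary search does O(1) lookups per step instead of re-summing nums[:mid].

-- ===== PORT A =====
def solveLoopA (nums : List Int) (s : Int) (l r : Int) : Option Int :=
  if _h : l < r then
    let mid := PySem.Int.floordiv (l + r) 2
    match PySem.List.pyGet? nums mid with
    | none => none  -- IndexError; unreachable from solve (mid is always in range there)
    | some v =>
      if (PySem.List.slice nums none (some mid)).sum > PySem.Int.floordiv (s - v) 2 then
        solveLoopA nums s l (mid - 1)
      else if (PySem.List.slice nums none (some mid)).sum < PySem.Int.floordiv (s - v) 2 then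
        solveLoopA nums s (mid + 1) r
      else some mid
  else none
termination_by (r - l).toNat
decreasing_by
  all_goals
    have hb := PySem.Int.floordiv_two_mid_bounds (lo := l) (hi := r) (by omega)
    omega

def solve (nums : List Int) : Option Int :=
  solveLoopA nums nums.sum 0 ((nums.length : Int) - 1)

-- ===== PORT B =====
def solveLoopB (pre : List Int) (total : Int) (l r : Int) : Option Int :=
  if _h : l < r then
    let mid := PySem.Int.floordiv (l + r) 2
    match PySem.List.pyGet? pre mid, PySem.List.pyGet? pre (mid + 1) with
    | some left, some p1 =>
      if left > PySem.Int.floordiv (total - (p1 - left)) 2 then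
        solveLoopB pre total l (mid - 1)
      else if left < PySem.Int.floordiv (total - (p1 - left)) 2 then
        solveLoopB pre total (mid + 1) r
      else some mid
    | _, _ => none  -- IndexError; unreachable from solve_alt (pre has length len(nums)+1)
  else none
termination_by (r - l).toNat
decreasing_by
  all_goals
    have hb := PySem.Int.floordiv_two_mid_bounds (lo := l) (hi := r) (by omega)
    omega

def solve_alt (nums : List Int) : Option Int :=
  let st := nums.foldl (fun (st : List Int × Int) x => (st.1 ++ [st.2 + x], st.2 + x))
      (([0] : List Int), (0 : Int))
  match PySem.List.pyGet? st.1 (-1) with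
  | none => none  -- unreachable: the prefix list is never empty
  | some total => solveLoopB st.1 total 0 ((nums.length : Int) - 1)

-- ===== PRECONDITION & SPEC =====
def Spec_solve (nums : List Int) (out : Option Int) : Prop := out = solve_alt nums
instance (nums : List Int) (out : Option Int) : Decidable (Spec_solve nums out) := by unfold Spec_solve; infer_instance

-- ===== CLAIM (what is proved, stated in full; the proofs are below) =====
def Claim_equal_solve : Prop := ∀ (nums : List Int), Dom_solve nums → Spec_solve nums (solve nums)

-- ===== LEMMAS AND PROOFS =====

-- B's prefix-building fold appends the running sums after the seed list.
lemma foldl_pre (nums : List Int) : ∀ (p : List Int) (a : Int),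
    (nums.foldl (fun (st : List Int × Int) x => (st.1 ++ [st.2 + x], st.2 + x)) (p, a)).1
      = p ++ (List.range nums.length).map (fun i => a + (nums.take (i + 1)).sum) := by
  induction nums with
  | nil => simp
  | cons x t ih =>
    intro p a
    simp only [List.foldl_cons, ih, List.length_cons, List.range_succ_eq_map,
      List.map_cons, List.map_map]
    simp [Function.comp_def, List.take_succ_cons, add_assoc]

-- The prefix list is exactly [sum(nums[:i]) for i in range(len(nums)+1)].
lemma pre_char (nums : List Int) :
    (nums.foldl (fun (st : List Int × Int) x => (st.1 ++ [st.2 + x], st.2 + x))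
        (([0] : List Int), (0 : Int))).1
      = (List.range (nums.length + 1)).map (fun i => (nums.take i).sum) := by
  rw [foldl_pre, List.range_succ_eq_map]
  simp [Function.comp_def]

lemma pre_get (nums : List Int) (k : Nat) (hk : k ≤ nums.length) :
    ((List.range (nums.length + 1)).map (fun i => (nums.take i).sum))[k]?
      = some ((nums.take k).sum) := by
  rw [List.getElem?_map, List.getElem?_range (by omega)]
  simp

-- The two binary-search loops take the same branch at every step.
lemma loop_eq (nums pre : List Int)
    (hpre : ∀ k : Nat, k ≤ nums.length → pre[k]? = some ((nums.take k).sum)) :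
    ∀ (k : Nat) (l r : Int), (r - l).toNat ≤ k → 0 ≤ l → r ≤ (nums.length : Int) - 1 →
      solveLoopA nums nums.sum l r = solveLoopB pre nums.sum l r := by
  intro k
  induction k with
  | zero =>
    intro l r hk h0 hr
    have hlr : ¬ l < r := by omega
    rw [solveLoopA, solveLoopB]
    simp [hlr]
  | succ k ih =>
    intro l r hk h0 hr
    rw [solveLoopA, solveLoopB]
    by_cases hlr : l < r
    · simp only [hlr, dite_true]
      have hb := PySem.Int.floordiv_two_mid_bounds (lo := l) (hi := r) (le_of_lt hlr)
      set mid := PySem.Int.floordiv (l + r) 2 with hmid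
      have hmr : mid < r := by
        rw [hmid, PySem.Int.floordiv_lt_iff_lt_mul (by norm_num)]; omega
      have h0m : 0 ≤ mid := le_trans h0 hb.1
      have hmn : mid.toNat < nums.length := by omega
      have hA : PySem.List.pyGet? nums mid = some nums[mid.toNat] := by
        rw [PySem.List.pyGet?_of_nonneg nums h0m, List.getElem?_eq_getElem hmn]
      have hP0 : PySem.List.pyGet? pre mid = some ((nums.take mid.toNat).sum) := by
        rw [PySem.List.pyGet?_of_nonneg pre h0m]; exact hpre _ (by omega)
      have hP1 : PySem.List.pyGet? pre (mid + 1) = some ((nums.take (mid.toNat + 1)).sum) := by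
        rw [PySem.List.pyGet?_of_nonneg pre (by omega)]
        have : (mid + 1).toNat = mid.toNat + 1 := by omega
        rw [this]; exact hpre _ (by omega)
      have hsl : PySem.List.slice nums none (some mid) = nums.take mid.toNat :=
        PySem.List.slice_to nums h0m
      have hsum : (nums.take (mid.toNat + 1)).sum = (nums.take mid.toNat).sum + nums[mid.toNat] := by
        rw [List.take_add_one, List.sum_append, List.getElem?_eq_getElem hmn]
        simp
      rw [hA, hP0, hP1, hsl]
      simp only [hsum]
      have harg : (nums.take mid.toNat).sum + nums[mid.toNat] - (nums.take mid.toNat).sum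
          = nums[mid.toNat] := by ring
      rw [harg]
      split_ifs with h1 h2
      · exact ih l (mid - 1) (by omega) h0 (by omega)
      · exact ih (mid + 1) r (by omega) (by omega) hr
      · rfl
    · simp [hlr]

-- ===== VERDICT (by name: the statement is the Claim_ definition above) =====
theorem solve_spec : Claim_equal_solve := by
  intro nums _
  unfold Spec_solve solve solve_alt
  set pre := (nums.foldl (fun (st : List Int × Int) x => (st.1 ++ [st.2 + x], st.2 + x))
      (([0] : List Int), (0 : Int))).1 with hpredef
  have hchar := pre_char nums
  have hlen : pre.length = nums.length + 1 := by
    rw [hpredef, hchar]; simp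
  have hget : ∀ k : Nat, k ≤ nums.length → pre[k]? = some ((nums.take k).sum) := by
    intro k hk
    rw [hpredef, hchar]
    exact pre_get nums k hk
  have htot : PySem.List.pyGet? pre (-1) = some nums.sum := by
    rw [PySem.List.pyGet?_neg_one, List.getLast?_eq_getElem?, hlen]
    have := hget nums.length (le_refl _)
    simpa [List.take_length] using this
  simp only []
  rw [htot]
  exact (loop_eq nums pre hget ((((nums.length : Int) - 1) - 0).toNat) 0
    ((nums.length : Int) - 1) (le_refl _) (le_refl _) (le_refl _)).symm ▸ rfl
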